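-- pv_equiv track=rewrite | github.com/SK-la/LA-s-EZ2OSU | bin/Samples.py | get_y_values
-- ===== SOURCE A (Python) =====
-- def get_y_values(data):
--     all_notes = []
--     valid_notes = []
--
--     for channel in data['sound_channels']:
--         for note in channel['notes']:
--             if 'x' in note and 'y' in note:
--                 all_notes.append(note)
--                 if 1 <= note['x'] <= 16:
--                     valid_notes.append(note)
--
--     all_notes.sort(key=lambda notes: notes['y'])
--     valid_notes.sort(key=lambda notes: notes['y'])
--
--     y_start = all_notes[0]['y'] if all_notes else 0
--     y_end = all_notes[-1]['y'] if all_notes else 0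
--     y_min = valid_notes[0]['y'] if valid_notes else y_start
--
--     return y_start, y_end, y_min, all_notes
-- ===== SOURCE B (Python) =====
-- def get_y_values(data):
--     all_notes = sorted(
--         (note for channel in data['sound_channels'] for note in channel['notes']
--          if 'x' in note and 'y' in note),
--         key=lambda n: n['y'])
--     y_start = all_notes[0]['y'] if all_notes else 0
--     y_end = all_notes[-1]['y'] if all_notes else 0
--     y_min = min((n['y'] for n in all_notes if 1 <= n['x'] <= 16), default=y_start)
--     return y_start, y_end, y_min, all_notes
-- ===== Notes on version B (the rewrite author's own statement) =====
-- stated objective: simpler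
-- what changed: B builds the collected notes with one flattening generator fed straight into a single sorted() call and computes y_min as a running min() over the valid y-values with a default, eliminating A's separate valid_notes list, its second sort and the explicit nested append loops.
import Mathlib
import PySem

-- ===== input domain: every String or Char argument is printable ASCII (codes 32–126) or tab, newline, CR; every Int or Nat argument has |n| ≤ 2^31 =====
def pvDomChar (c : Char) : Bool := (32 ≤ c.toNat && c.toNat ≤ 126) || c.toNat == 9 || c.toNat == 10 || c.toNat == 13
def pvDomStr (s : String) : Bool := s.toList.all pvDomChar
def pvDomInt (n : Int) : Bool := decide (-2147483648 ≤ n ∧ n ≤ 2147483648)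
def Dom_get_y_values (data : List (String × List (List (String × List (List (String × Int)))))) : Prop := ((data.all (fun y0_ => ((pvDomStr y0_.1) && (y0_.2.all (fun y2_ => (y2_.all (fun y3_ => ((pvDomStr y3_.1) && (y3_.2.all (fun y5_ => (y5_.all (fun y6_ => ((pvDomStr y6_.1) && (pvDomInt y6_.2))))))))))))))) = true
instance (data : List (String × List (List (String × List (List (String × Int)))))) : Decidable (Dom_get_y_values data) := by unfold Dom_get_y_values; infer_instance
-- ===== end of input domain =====

-- B flattens the collection into one sorted() call and replaces the valid_notes list + second sort
-- by a running min over the valid y-values (objective: simpler).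


-- shared accessors: a note is a Python dict (assoc list); lookups go through PySem.Dict
def pvNoteY (n : List (String × Int)) : Int := (PySem.Dict.ofList n).getD "y" 0
def pvNoteX (n : List (String × Int)) : Int := (PySem.Dict.ofList n).getD "x" 0
def pvHasXY (n : List (String × Int)) : Bool :=
  (PySem.Dict.ofList n).contains "x" && (PySem.Dict.ofList n).contains "y"
def pvValidX (n : List (String × Int)) : Bool :=
  decide (1 ≤ pvNoteX n) && decide (pvNoteX n ≤ 16)
-- channel['notes'] (KeyError excluded by Pre_, hence the [] default)
def pvChannelNotes (c : List (String × List (List (String × Int)))) : List (List (String × Int)) :=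
  (PySem.Dict.ofList c).getD "notes" []

-- ===== PORT A =====
def get_y_values (data : List (String × List (List (String × List (List (String × Int)))))) : Int × Int × Int × (List (List (String × Int))) :=
  let channels := (PySem.Dict.ofList data).getD "sound_channels" []
  let acc := channels.foldl (fun acc channel =>
      (pvChannelNotes channel).foldl
        (fun (acc : List (List (String × Int)) × List (List (String × Int))) note =>
          if pvHasXY note then
            let acc1 := (acc.1 ++ [note], acc.2)
            if pvValidX note then (acc1.1, acc1.2 ++ [note]) else acc1
          else acc) acc) ([], [])
  let all_notes := PySem.List.sorted acc.1 pvNoteY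
  let valid_notes := PySem.List.sorted acc.2 pvNoteY
  let y_start := match all_notes with | [] => 0 | n :: _ => pvNoteY n
  let y_end := match all_notes.getLast? with | none => 0 | some n => pvNoteY n
  let y_min := match valid_notes with | [] => y_start | n :: _ => pvNoteY n
  (y_start, y_end, y_min, all_notes)

-- ===== PORT B =====
def get_y_values_alt (data : List (String × List (List (String × List (List (String × Int)))))) : Int × Int × Int × (List (List (String × Int))) :=
  let channels := (PySem.Dict.ofList data).getD "sound_channels" []
  let all_notes := PySem.List.sorted
      (channels.flatMap (fun channel => (pvChannelNotes channel).filter pvHasXY)) pvNoteY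
  let y_start := match all_notes with | [] => 0 | n :: _ => pvNoteY n
  let y_end := match all_notes.getLast? with | none => 0 | some n => pvNoteY n
  let y_min := PySem.List.minD ((all_notes.filter pvValidX).map pvNoteY) (fun y => y) y_start
  (y_start, y_end, y_min, all_notes)

-- ===== PRECONDITION & SPEC =====
-- A raises KeyError when data lacks 'sound_channels' or some channel lacks 'notes'; exactly those inputs are excluded.
def Pre_get_y_values (data : List (String × List (List (String × List (List (String × Int)))))) : Prop :=
  (PySem.Dict.ofList data).contains "sound_channels" = true ∧
  ∀ c ∈ (PySem.Dict.ofList data).getD "sound_channels" [],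
    (PySem.Dict.ofList c).contains "notes" = true
instance (data : List (String × List (List (String × List (List (String × Int)))))) : Decidable (Pre_get_y_values data) := by unfold Pre_get_y_values; infer_instance
def pvWitness_get_y_values : (List (String × List (List (String × List (List (String × Int)))))) :=
  [("sound_channels", [[("notes", [[("x", 1), ("y", 2)], [("y", 5)]])]])]
def Spec_get_y_values (data : List (String × List (List (String × List (List (String × Int)))))) (out : Int × Int × Int × (List (List (String × Int)))) : Prop := out = get_y_values_alt data
instance (data : List (String × List (List (String × List (List (String × Int)))))) (out : Int × Int × Int × (List (List (String × Int)))) : Decidable (Spec_get_y_values data out) := by unfold Spec_get_y_values; infer_instance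

-- ===== CLAIM (what is proved, stated in full; the proofs are below) =====
def Claim_equal_get_y_values : Prop := ∀ (data : List (String × List (List (String × List (List (String × Int)))))), Dom_get_y_values data → Pre_get_y_values data → Spec_get_y_values data (get_y_values data)

-- ===== LEMMAS AND PROOFS =====

-- A's inner loop over one channel's notes, on the pair accumulator
theorem pv_inner_fold (notes : List (List (String × Int)))
    (a v : List (List (String × Int))) :
    notes.foldl
      (fun (acc : List (List (String × Int)) × List (List (String × Int))) note =>
        if pvHasXY note then
          let acc1 := (acc.1 ++ [note], acc.2)
          if pvValidX note then (acc1.1, acc1.2 ++ [note]) else acc1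
        else acc) (a, v)
    = (a ++ notes.filter pvHasXY, v ++ (notes.filter pvHasXY).filter pvValidX) := by
  induction notes generalizing a v with
  | nil => simp
  | cons n t ih =>
    by_cases h : pvHasXY n = true
    · by_cases h2 : pvValidX n = true
      · simp [List.foldl_cons, h, h2, ih]
      · simp [List.foldl_cons, h, h2, ih]
    · simp [List.foldl_cons, h, ih]

-- A's outer loop: the two accumulated lists in closed form
theorem pv_outer_fold (chs : List (List (String × List (List (String × Int)))))
    (a v : List (List (String × Int))) :
    chs.foldl (fun acc channel =>
      (pvChannelNotes channel).foldl
        (fun (acc : List (List (String × Int)) × List (List (String × Int))) note =>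
          if pvHasXY note then
            let acc1 := (acc.1 ++ [note], acc.2)
            if pvValidX note then (acc1.1, acc1.2 ++ [note]) else acc1
          else acc) acc) (a, v)
    = (a ++ chs.flatMap (fun c => (pvChannelNotes c).filter pvHasXY),
       v ++ (chs.flatMap (fun c => (pvChannelNotes c).filter pvHasXY)).filter pvValidX) := by
  induction chs generalizing a v with
  | nil => simp
  | cons c t ih =>
    simp only [List.foldl_cons, pv_inner_fold, ih, List.flatMap_cons, List.filter_append,
      List.append_assoc]

-- head-of-sorted-valid equals B's running min, for any list with the same valid notes
theorem pv_ymin_eq (all : List (List (String × Int))) (d : Int) :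
    (match PySem.List.sorted (all.filter pvValidX) pvNoteY with
      | [] => d
      | n :: _ => pvNoteY n)
    = PySem.List.minD (((PySem.List.sorted all pvNoteY).filter pvValidX).map pvNoteY)
        (fun y => y) d := by
  have hperm : ((PySem.List.sorted all pvNoteY).filter pvValidX).Perm (all.filter pvValidX) :=
    (PySem.List.sorted_perm all pvNoteY false).filter _
  rcases hS : PySem.List.sorted (all.filter pvValidX) pvNoteY with _ | ⟨m, t⟩
  · have hV : all.filter pvValidX = [] := (PySem.List.sorted_eq_nil_iff _ _ _).mp hS
    have hW : (PySem.List.sorted all pvNoteY).filter pvValidX = [] :=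
      List.Perm.eq_nil (hV ▸ hperm)
    simp [hW, PySem.List.minD_nil]
  · -- nonempty case: both sides are the minimum y among valid notes
    set W := (PySem.List.sorted all pvNoteY).filter pvValidX with hWdef
    have hWne : W ≠ [] := by
      intro h
      rw [h] at hperm
      have hV : all.filter pvValidX = [] := hperm.symm.eq_nil
      rw [hV] at hS
      simp [PySem.List.sorted] at hS
    have hmapne : W.map pvNoteY ≠ [] := by
      simpa using hWne
    have hm_mem : m ∈ all.filter pvValidX := by
      have : m ∈ PySem.List.sorted (all.filter pvValidX) pvNoteY := by simp [hS]
      exact (PySem.List.sorted_perm _ _ _).mem_iff.mp this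
    have hm_memW : m ∈ W := hperm.mem_iff.mpr hm_mem
    set b := PySem.List.minD (W.map pvNoteY) (fun y => y) d with hbdef
    have hb_mem : b ∈ W.map pvNoteY := PySem.List.minD_mem _ _ _ hmapne
    obtain ⟨w, hwW, hwb⟩ := List.mem_map.mp hb_mem
    have hw_memV : w ∈ all.filter pvValidX := hperm.mem_iff.mp hwW
    have h1 : pvNoteY m ≤ b := by
      rw [← hwb]
      exact PySem.List.key_head_sorted_le _ _ hS w hw_memV
    have h2 : b ≤ pvNoteY m := by
      have := PySem.List.key_minD_le (W.map pvNoteY) (fun y => y) d hmapne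
        (pvNoteY m) (List.mem_map_of_mem hm_memW)
      simpa [hbdef] using this
    simp only []
    omega

-- ===== VERDICT (by name: the statement is the Claim_ definition above) =====
theorem get_y_values_spec : Claim_equal_get_y_values := by
  intro data _ _
  unfold Spec_get_y_values get_y_values get_y_values_alt
  simp only [pv_outer_fold, List.nil_append]
  rw [pv_ymin_eq]
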